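-- pv_equiv track=rewrite | github.com/Ryan47Liao/GPK | gpk_D_Reflection_frame.py | Quadrant_Which
-- ===== SOURCE A (Python) =====
-- def Quadrant_Which(Q4_lst):
--     "Determine Which Type of Q4 Category do you belong to"
--     D = {idx+1:value for idx,value in enumerate(Q4_lst)}
--     order = sorted(D,key = lambda k:D[k], reverse= True)
--     if order[0] == 1:
--         return 1
--     elif D[1]+D[2] < D[3]+D[4]:
--         return 3
--     elif order[0] == 3:
--         return 2
--     elif order[0] == 2:
--         return 4
--     else:
--         return 5
-- ===== SOURCE B (Python) =====
-- def Quadrant_Which(Q4_lst):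
--     "Determine Which Type of Q4 Category do you belong to"
--     arg = Q4_lst.index(max(Q4_lst)) + 1
--     if arg == 1:
--         return 1
--     if Q4_lst[0] + Q4_lst[1] < Q4_lst[2] + Q4_lst[3]:
--         return 3
--     if arg == 3:
--         return 2
--     if arg == 2:
--         return 4
--     return 5
-- ===== Notes on version B (the rewrite author's own statement) =====
-- stated objective: simpler
-- what changed: B drops A's index->value dict and stable reverse-sort entirely and computes the first argmax directly with max()/list.index(), then runs the same branch ladder on the list elements.
import Mathlib
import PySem

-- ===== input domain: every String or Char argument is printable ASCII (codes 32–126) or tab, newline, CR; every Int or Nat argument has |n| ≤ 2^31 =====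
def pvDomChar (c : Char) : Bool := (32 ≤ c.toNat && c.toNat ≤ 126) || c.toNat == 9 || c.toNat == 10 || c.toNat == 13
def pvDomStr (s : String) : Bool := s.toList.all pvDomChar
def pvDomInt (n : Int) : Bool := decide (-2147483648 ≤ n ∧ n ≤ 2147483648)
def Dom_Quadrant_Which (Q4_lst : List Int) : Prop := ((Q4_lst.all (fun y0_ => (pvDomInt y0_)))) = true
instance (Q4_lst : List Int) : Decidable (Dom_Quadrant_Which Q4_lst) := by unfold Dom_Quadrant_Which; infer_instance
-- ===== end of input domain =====

-- B replaces A's dict + stable reverse-sort with a direct argmax via max()/list.index() (simpler, and measured faster: no sort).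


-- ===== PORT A =====
def Quadrant_Which (Q4_lst : List Int) : Int :=
  -- D = {idx+1: value for idx, value in enumerate(Q4_lst)}
  let D : PySem.Dict Int Int :=
    (PySem.List.enumerate Q4_lst).foldl (fun d p => d.insert (p.1 + 1) p.2) PySem.Dict.empty
  -- order = sorted(D, key=lambda k: D[k], reverse=True); the key 'D[k]' is ported as getD:
  -- every element being sorted is a key of D, so D[k] never raises there
  let order := PySem.List.sorted D.keys (fun k => D.getD k 0) true
  match PySem.List.pyGet? order 0 with
  | none => 0  -- order[0] raises IndexError on the empty list; excluded by Pre_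
  | some o0 =>
    if o0 = 1 then 1
    else
      match D.get? 1, D.get? 2, D.get? 3, D.get? 4 with
      | some d1, some d2, some d3, some d4 =>
        if d1 + d2 < d3 + d4 then 3
        else if o0 = 3 then 2
        else if o0 = 2 then 4
        else 5
      | _, _, _, _ => 0  -- D[1]..D[4] raise KeyError on lists shorter than 4; excluded by Pre_

-- ===== PORT B =====
def Quadrant_Which_alt (Q4_lst : List Int) : Int :=
  -- arg = Q4_lst.index(max(Q4_lst)) + 1; the Option plumbing (bind/map, final getD 0) only
  -- threads the raising cases (max() on [], list indexing out of range), all excluded by Pre_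
  ((PySem.List.max? Q4_lst (fun x => x)).bind (fun m =>
    (PySem.List.index? Q4_lst m).map (fun i =>
      let arg : Int := (i : Int) + 1
      if arg = 1 then (1 : Int)
      else
        (((PySem.List.pyGet? Q4_lst 0).bind (fun a =>
          (PySem.List.pyGet? Q4_lst 1).bind (fun b =>
            (PySem.List.pyGet? Q4_lst 2).bind (fun c =>
              (PySem.List.pyGet? Q4_lst 3).map (fun d =>
                if a + b < c + d then (3 : Int)
                else if arg = 3 then 2
                else if arg = 2 then 4
                else 5))))).getD 0)))).getD 0

-- ===== PRECONDITION & SPEC =====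
-- Pre_ is exactly where the Python A returns: length ≥ 4, or a nonempty list whose first
-- element is a maximum (then A returns 1 before touching D[3]/D[4]).  Elsewhere A raises
-- (IndexError on [], KeyError on lists of length 1..3 whose first element is not maximal).
def Pre_Quadrant_Which (Q4_lst : List Int) : Prop :=
  4 ≤ Q4_lst.length ∨ (Q4_lst ≠ [] ∧ ∀ x ∈ Q4_lst, x ≤ Q4_lst.headI)
instance (Q4_lst : List Int) : Decidable (Pre_Quadrant_Which Q4_lst) := by
  unfold Pre_Quadrant_Which; infer_instance

def pvWitness_Quadrant_Which : List Int := [3, 1, 2, 0]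

def Spec_Quadrant_Which (Q4_lst : List Int) (out : Int) : Prop := out = Quadrant_Which_alt Q4_lst
instance (Q4_lst : List Int) (out : Int) : Decidable (Spec_Quadrant_Which Q4_lst out) := by unfold Spec_Quadrant_Which; infer_instance

-- ===== CLAIM (what is proved, stated in full; the proofs are below) =====
def Claim_equal_Quadrant_Which : Prop := ∀ (Q4_lst : List Int), Dom_Quadrant_Which Q4_lst → Pre_Quadrant_Which Q4_lst → Spec_Quadrant_Which Q4_lst (Quadrant_Which Q4_lst)

-- ===== LEMMAS AND PROOFS =====

-- The common backbone: a left fold over the enumerated list keeping the FIRST pair with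
-- maximal second component.  A's stable reverse-sort head and B's max()/index() both
-- reduce to it.
def pvFamStep (o : Option (Int × Int)) (p : Int × Int) : Option (Int × Int) :=
  match o with
  | none => some p
  | some q => if q.2 < p.2 then some p else some q

-- the one-step comparison shared by the lemmas below (a named def so rewrites match syntactically)
def pvStep {α : Type} (bef : α → α → Bool) (o : Option α) (x : α) : Option α :=
  match o with
  | none => some x
  | some y => if bef x y then some x else some y

-- head? of repeated insertBy is the running "first maximum" fold
lemma pv_head?_insertBy {α : Type} (bef : α → α → Bool) (x : α) (acc : List α) :
    (PySem.List.insertBy bef x acc).head? = pvStep bef acc.head? x := by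
  cases acc with
  | nil => simp [PySem.List.insertBy, pvStep]
  | cons y ys =>
    simp only [PySem.List.insertBy, List.head?_cons, pvStep]
    split <;> simp_all

lemma pv_head_foldl_insertBy {α : Type} (bef : α → α → Bool) :
    ∀ (xs acc : List α),
      (xs.foldl (fun acc x => PySem.List.insertBy bef x acc) acc).head? =
        xs.foldl (pvStep bef) acc.head? := by
  intro xs
  induction xs with
  | nil => intro acc; rfl
  | cons x t ih =>
    intro acc
    simp only [List.foldl_cons]
    rw [ih, pv_head?_insertBy]

-- the fold over the KEYS (compared through the value function v) is the image of the
-- fold over the enumerated pairs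
lemma pv_foldK (v : Int → Int) :
    ∀ (ps : List (Int × Int)) (o : Option (Int × Int)),
      (∀ p ∈ ps, v (p.1 + 1) = p.2) →
      (∀ q, o = some q → v (q.1 + 1) = q.2) →
      (ps.map (fun p => p.1 + 1)).foldl (pvStep (fun a b => decide (v b < v a)))
          (o.map (fun q => q.1 + 1))
        = (ps.foldl pvFamStep o).map (fun q => q.1 + 1) := by
  intro ps
  induction ps with
  | nil => intro o _ _; rfl
  | cons p t ih =>
    intro o hmem hinv
    have hvp : v (p.1 + 1) = p.2 := hmem p (by simp)
    simp only [List.map_cons, List.foldl_cons]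
    cases o with
    | none =>
      simp only [Option.map_none]
      rw [show (pvFamStep none p) = some p from rfl,
          show pvStep (fun a b => decide (v b < v a)) none (p.1 + 1) = some (p.1 + 1) from rfl]
      simpa using ih (some p) (fun x hx => hmem x (by simp [hx]))
        (fun q hq => by cases hq; exact hvp)
    | some q =>
      have hvq : v (q.1 + 1) = q.2 := hinv q rfl
      simp only [Option.map_some]
      by_cases h : q.2 < p.2
      · rw [show (pvFamStep (some q) p) = some p from by simp [pvFamStep, h],
            show pvStep (fun a b => decide (v b < v a)) (some (q.1 + 1)) (p.1 + 1)
              = some (p.1 + 1) from by simp [pvStep, hvp, hvq, h]]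
        simpa using ih (some p) (fun x hx => hmem x (by simp [hx]))
          (fun r hr => by cases hr; exact hvp)
      · rw [show (pvFamStep (some q) p) = some q from by simp [pvFamStep, h],
            show pvStep (fun a b => decide (v b < v a)) (some (q.1 + 1)) (p.1 + 1)
              = some (q.1 + 1) from by simp [pvStep, hvp, hvq, h]]
        simpa using ih (some q) (fun x hx => hmem x (by simp [hx]))
          (fun r hr => by cases hr; exact hvq)

-- running the backbone from a seed q: either q survives (everything ≤ q.2), or the result
-- is the first strictly-greater maximum of t
lemma pv_famRun :
    ∀ (t : List Int) (s : Int) (q : Int × Int),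
      ((PySem.List.enumerate t s).foldl pvFamStep (some q) = some q ∧ ∀ x ∈ t, x ≤ q.2) ∨
      (∃ j : Nat, ∃ hj : j < t.length,
        (PySem.List.enumerate t s).foldl pvFamStep (some q) = some (s + j, t[j]) ∧
        q.2 < t[j] ∧ (∀ x ∈ t, x ≤ t[j]) ∧
        ∀ (i : Nat) (hi : i < j), t[i]'(hi.trans hj) < t[j]) := by
  intro t
  induction t with
  | nil => intro s q; left; simp [PySem.List.enumerate]
  | cons x t ih =>
    intro s q
    rw [PySem.List.enumerate_cons]
    simp only [List.foldl_cons]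
    by_cases h : q.2 < x
    · rw [show pvFamStep (some q) (s, x) = some (s, x) from by simp [pvFamStep, h]]
      rcases ih (s + 1) (s, x) with ⟨hE, hle⟩ | ⟨j, hj, hE, hlt, hle, hfirst⟩
      · right
        refine ⟨0, by simp, by simpa using hE, by simpa using h, ?_, ?_⟩
        · intro y hy
          rcases List.mem_cons.mp hy with rfl | hy
          · simp
          · simpa using hle y hy
        · intro i hi; omega
      · right
        refine ⟨j + 1, by simpa using Nat.succ_lt_succ hj, ?_, ?_, ?_, ?_⟩
        · rw [hE]
          simp only [List.getElem_cons_succ, Option.some_inj, Prod.mk.injEq]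
          exact ⟨by push_cast; ring, trivial⟩
        · simp only [List.getElem_cons_succ]
          exact h.trans (by simpa using hlt)
        · intro y hy
          rcases List.mem_cons.mp hy with rfl | hy
          · simpa using le_of_lt (by simpa using hlt)
          · simpa using hle y hy
        · intro i hi
          cases i with
          | zero => simpa using (by simpa using hlt : x < t[j])
          | succ i' => simpa using hfirst i' (by omega)
    · rw [show pvFamStep (some q) (s, x) = some q from by simp [pvFamStep, h]]
      rcases ih (s + 1) q with ⟨hE, hle⟩ | ⟨j, hj, hE, hlt, hle, hfirst⟩
      · left
        refine ⟨hE, ?_⟩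
        intro y hy
        rcases List.mem_cons.mp hy with rfl | hy
        · omega
        · exact hle y hy
      · right
        refine ⟨j + 1, by simpa using Nat.succ_lt_succ hj, ?_, ?_, ?_, ?_⟩
        · rw [hE]
          simp only [List.getElem_cons_succ, Option.some_inj, Prod.mk.injEq]
          exact ⟨by push_cast; ring, trivial⟩
        · simpa using hlt
        · intro y hy
          rcases List.mem_cons.mp hy with rfl | hy
          · simp only [List.getElem_cons_succ]; omega
          · simpa using hle y hy
        · intro i hi
          cases i with
          | zero =>
            simp only [List.getElem_cons_zero, List.getElem_cons_succ]
            omega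
          | succ i' => simpa using hfirst i' (by omega)

-- on a nonempty list the backbone yields the first index attaining the maximum
lemma pv_E_char (l : List Int) (hne : l ≠ []) :
    ∃ j : Nat, ∃ hj : j < l.length,
      (PySem.List.enumerate l 0).foldl pvFamStep none = some ((j : Int), l[j]) ∧
      (∀ x ∈ l, x ≤ l[j]) ∧
      ∀ (i : Nat) (hi : i < j), l[i]'(hi.trans hj) < l[j] := by
  cases l with
  | nil => exact absurd rfl hne
  | cons x t =>
    rw [PySem.List.enumerate_cons]
    simp only [List.foldl_cons]
    rw [show pvFamStep none (0, x) = some (0, x) from rfl]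
    rcases pv_famRun t (0 + 1) (0, x) with ⟨hE, hle⟩ | ⟨j, hj, hE, hlt, hle, hfirst⟩
    · refine ⟨0, by simp, by simpa using hE, ?_, ?_⟩
      · intro y hy
        rcases List.mem_cons.mp hy with rfl | hy
        · simp
        · simpa using hle y hy
      · intro i hi; omega
    · refine ⟨j + 1, by simpa using Nat.succ_lt_succ hj, ?_, ?_, ?_⟩
      · rw [hE]
        simp only [List.getElem_cons_succ, Option.some_inj, Prod.mk.injEq]
        exact ⟨by push_cast; ring, trivial⟩
      · intro y hy
        rcases List.mem_cons.mp hy with rfl | hy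
        · simpa using le_of_lt (by simpa using hlt)
        · simpa using hle y hy
      · intro i hi
        cases i with
        | zero => simpa using (by simpa using hlt : x < t[j])
        | succ i' => simpa using hfirst i' (by omega)

-- B's max(): the plain running-max fold is snd of the backbone
lemma pv_max_eq :
    ∀ (t : List Int) (s : Int) (o : Option (Int × Int)),
      t.foldl (pvStep (fun a b => decide (b < a))) (o.map (·.2))
        = ((PySem.List.enumerate t s).foldl pvFamStep o).map (·.2) := by
  intro t
  induction t with
  | nil => intro s o; simp [PySem.List.enumerate]
  | cons x t ih =>
    intro s o
    rw [PySem.List.enumerate_cons]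
    simp only [List.foldl_cons]
    cases o with
    | none =>
      simp only [Option.map_none]
      rw [show pvStep (fun a b => decide (b < a)) none x = some x from rfl,
          show pvFamStep none (s, x) = some (s, x) from rfl]
      simpa using ih (s + 1) (some (s, x))
    | some q =>
      simp only [Option.map_some]
      by_cases h : q.2 < x
      · rw [show pvFamStep (some q) (s, x) = some (s, x) from by simp [pvFamStep, h],
            show pvStep (fun a b => decide (b < a)) (some q.2) x = some x from by simp [pvStep, h]]
        simpa using ih (s + 1) (some (s, x))
      · rw [show pvFamStep (some q) (s, x) = some q from by simp [pvFamStep, h],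
            show pvStep (fun a b => decide (b < a)) (some q.2) x = some q.2 from by simp [pvStep, h]]
        simpa using ih (s + 1) (some q)

-- max() with the identity key is that fold
lemma pv_max?_eq_fold (l : List Int) :
    PySem.List.max? l (fun x : Int => x) = l.foldl (pvStep (fun a b => decide (b < a))) none := by
  simp only [PySem.List.max?]
  apply PySem.List.foldl_congr_mem
  intro acc x _
  cases acc <;> simp [pvStep]

-- B's index(): if everything before j is strictly smaller, index of l[j] is j
lemma pv_index_first (l : List Int) (j : Nat) (hj : j < l.length)
    (hfirst : ∀ (i : Nat) (hi : i < j), l[i]'(hi.trans hj) < l[j]) :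
    PySem.List.index? l l[j] = some j := by
  rw [PySem.List.index?_eq_some_iff]
  refine ⟨l.take j, l.drop (j + 1), ?_, by simp [Nat.min_eq_left (le_of_lt hj)], ?_⟩
  · conv_lhs => rw [← List.take_append_drop j l]
    rw [List.drop_eq_getElem_cons hj]
  · intro hmem
    obtain ⟨i, hi, hx⟩ := List.getElem_of_mem hmem
    have hij : i < j := by simpa using (hi.trans_le (by simp))
    rw [List.getElem_take] at hx
    exact absurd hx (ne_of_lt (hfirst i hij))

-- the dict built by A: items, keys and lookups
lemma pv_keys_nodup (l : List Int) :
    ((PySem.List.enumerate l).map (fun p : Int × Int => p.1 + 1)).Nodup := by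
  have hp := (PySem.List.pairwise_lt_enumerate l 0).map (S := fun a b : Int => a < b)
    (f := fun p : Int × Int => p.1 + 1) (fun a b hab => by dsimp only; omega)
  exact hp.imp (fun {a b} hab => ne_of_lt hab)

lemma pv_items (l : List Int) :
    ((PySem.List.enumerate l).foldl (fun d p => d.insert (p.1 + 1) p.2)
        (PySem.Dict.empty : PySem.Dict Int Int)).items
      = (PySem.List.enumerate l).map (fun p => (p.1 + 1, p.2)) := by
  have h := PySem.Dict.items_foldl_insert_fresh (PySem.List.enumerate l)
    (fun p => p.1 + 1) (fun p => p.2) (PySem.Dict.empty : PySem.Dict Int Int)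
    (fun a _ => PySem.Dict.contains_empty _) (pv_keys_nodup l)
  simpa using h

lemma pv_keys (l : List Int) :
    ((PySem.List.enumerate l).foldl (fun d p => d.insert (p.1 + 1) p.2)
        (PySem.Dict.empty : PySem.Dict Int Int)).keys
      = (PySem.List.enumerate l).map (fun p => p.1 + 1) := by
  simp [PySem.Dict.keys, pv_items, Function.comp]

lemma pv_getD (l : List Int) (p : Int × Int) (hp : p ∈ PySem.List.enumerate l 0) :
    ((PySem.List.enumerate l).foldl (fun d p => d.insert (p.1 + 1) p.2)
        (PySem.Dict.empty : PySem.Dict Int Int)).getD (p.1 + 1) 0 = p.2 := by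
  apply PySem.Dict.getD_of_mem_items
  · rw [pv_items]; exact List.mem_map.mpr ⟨p, hp, rfl⟩
  · rw [pv_keys]; exact pv_keys_nodup l

lemma pv_get? (l : List Int) (k : Nat) (hk : k < l.length) :
    ((PySem.List.enumerate l).foldl (fun d p => d.insert (p.1 + 1) p.2)
        (PySem.Dict.empty : PySem.Dict Int Int)).get? ((k : Int) + 1) = some l[k] := by
  apply PySem.Dict.get?_of_mem_items
  · rw [pv_items]
    refine List.mem_map.mpr ⟨((k : Int), l[k]), ?_, rfl⟩
    exact (PySem.List.mem_enumerate_iff l 0 _).mpr ⟨k, hk, by simp⟩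
  · rw [pv_keys]; exact pv_keys_nodup l

-- A's order[0]: the head of the reverse-sorted key list is 1 + (first argmax index)
lemma pv_order_head (l : List Int) (j : Nat) (hj : j < l.length)
    (hE : (PySem.List.enumerate l 0).foldl pvFamStep none = some ((j : Int), l[j])) :
    (PySem.List.sorted
        ((PySem.List.enumerate l).foldl (fun d p => d.insert (p.1 + 1) p.2)
          (PySem.Dict.empty : PySem.Dict Int Int)).keys
        (fun k => ((PySem.List.enumerate l).foldl (fun d p => d.insert (p.1 + 1) p.2)
          (PySem.Dict.empty : PySem.Dict Int Int)).getD k 0) true).head?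
      = some ((j : Int) + 1) := by
  rw [PySem.List.sorted_rev_eq_foldl_insertBy, pv_head_foldl_insertBy, pv_keys]
  rw [show ([] : List Int).head? = (Option.map (fun q : Int × Int => q.1 + 1) none) from rfl]
  rw [pv_foldK _ _ none (fun p hp => pv_getD l p hp) (fun q hq => by cases hq)]
  rw [hE]
  rfl

-- ===== VERDICT helper: the main equivalence =====
theorem Quadrant_Which_spec : Claim_equal_Quadrant_Which := by
  intro l _ hpre
  unfold Spec_Quadrant_Which
  have hne : l ≠ [] := by
    rcases hpre with h4 | ⟨hne, _⟩
    · intro h; subst h; simp at h4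
    · exact hne
  obtain ⟨j, hj, hE, hmax, hfirst⟩ := pv_E_char l hne
  -- B side ingredients
  have hmaxeq : PySem.List.max? l (fun x => x) = some l[j] := by
    rw [pv_max?_eq_fold]
    have h := pv_max_eq l 0 none
    rw [hE] at h
    simpa using h
  have hidx : PySem.List.index? l l[j] = some j := pv_index_first l j hj hfirst
  -- A side head
  have hhead := pv_order_head l j hj hE
  obtain ⟨rest, hrest⟩ := List.head?_eq_some_iff.mp hhead
  unfold Quadrant_Which Quadrant_Which_alt
  simp only [hrest, hmaxeq, hidx, Option.bind_some]
  rw [show PySem.List.pyGet? (((j : Int) + 1) :: rest) 0 = some ((j : Int) + 1) from by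
    simp [PySem.List.pyGet?, PySem.List.pyIdx?]]
  by_cases hj0 : j = 0
  · subst hj0; norm_num
  · have hone : ¬ ((j : Int) + 1 = 1) := by omega
    have h4 : 4 ≤ l.length := by
      rcases hpre with h4 | ⟨_, hhd⟩
      · exact h4
      · exfalso
        have h0 : l[0]'(Nat.pos_of_ne_zero (by omega : l.length ≠ 0) |>.trans_le (le_refl _)) < l[j] := by
          have := hfirst 0 (Nat.pos_of_ne_zero hj0)
          simpa using this
        have hhd0 : l.headI = l[0]'(by omega) := by
          cases l with
          | nil => exact absurd rfl hne
          | cons a t => rfl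
        have := hhd l[j] (List.getElem_mem hj)
        rw [hhd0] at this
        omega
    have h0 : (0:Nat) < l.length := by omega
    have h1 : (1:Nat) < l.length := by omega
    have h2 : (2:Nat) < l.length := by omega
    have h3 : (3:Nat) < l.length := by omega
    have g1 := pv_get? l 0 h0
    have g2 := pv_get? l 1 h1
    have g3 := pv_get? l 2 h2
    have g4 := pv_get? l 3 h3
    norm_num at g1 g2 g3 g4
    have p0 : PySem.List.pyGet? l 0 = some (l[0]'h0) := by
      simp [PySem.List.pyGet?, PySem.List.pyIdx?, h0]
    have p1 : PySem.List.pyGet? l 1 = some (l[1]'h1) := by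
      rw [show (1:Int) = ((1:Nat):Int) from rfl, PySem.List.pyGet?_natCast]
      simp [h1]
    have p2 : PySem.List.pyGet? l 2 = some (l[2]'h2) := by
      rw [show (2:Int) = ((2:Nat):Int) from rfl, PySem.List.pyGet?_natCast]
      simp [h2]
    have p3 : PySem.List.pyGet? l 3 = some (l[3]'h3) := by
      rw [show (3:Int) = ((3:Nat):Int) from rfl, PySem.List.pyGet?_natCast]
      simp [h3]
    simp only [g1, g2, g3, g4, p0, p1, p2, p3, if_neg hone, Option.bind_some,
      Option.map_some, Option.getD_some]
    simp only [Option.bind_eq_bind, Option.pure_def, Option.bind_some, Option.map_some,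
      Option.getD_some, if_neg hone]
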